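-- pv_equiv track=rewrite | github.com/yebrwe/Algorithm | kakao/2020/blind_recruitment/괄호변환.py | convert
-- ===== SOURCE A (Python) =====
-- from collections import deque
--
-- def valid(p):
--     left = deque([])
--     for c in p:
--         if c == '(':
--             left.appendleft(c)
--         elif c == ')':
--             if left:
--                 left.pop()
--             else:
--                 return False
--     return True
--
-- def convert(p):
--     if not p: return ''
--
--     left = deque([])
--     right = deque([])
--     u = v = ''
--
--     for i, c in enumerate(p):
--         if c == '(':
--             left.appendleft(c)
--         else:
--             right.appendleft(c)
--
--         if len(left) == len(right):
--             u = p[0:i+1]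
--             v = p[i+1:]
--             break
--     if valid(u):
--         return u + convert(v)
--     else:
--         str = '(' + convert(v) + ')'
--         for c in u[1:len(u)-1]:
--             str += ')' if c=='(' else '('
--         return str
-- ===== SOURCE B (Python) =====
-- def convert(p):
--     def is_correct(u):
--         bal = 0
--         for c in u:
--             if c == '(':
--                 bal += 1
--             elif c == ')':
--                 if bal == 0:
--                     return False
--                 bal -= 1
--         return True
--
--     pre = []
--     post = []
--     s = p
--     while s:
--         bal = 0
--         idx = None
--         for i, c in enumerate(s):
--             bal += 1 if c == '(' else -1
--             if bal == 0:
--                 idx = i + 1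
--                 break
--         if idx is None:
--             break
--         u, v = s[:idx], s[idx:]
--         if is_correct(u):
--             pre.append(u)
--         else:
--             pre.append('(')
--             post.append(')' + ''.join(')' if c == '(' else '(' for c in u[1:idx-1]))
--         s = v
--     return ''.join(pre) + ''.join(reversed(post))
-- ===== Notes on version B (the rewrite author's own statement) =====
-- stated objective: alternative
-- what changed: Replaced the recursive deque-based splitter by a single iterative while-loop that finds each split point with a running balance counter and accumulates prefix/suffix string pieces in lists joined once at the end.
import Mathlib
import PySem

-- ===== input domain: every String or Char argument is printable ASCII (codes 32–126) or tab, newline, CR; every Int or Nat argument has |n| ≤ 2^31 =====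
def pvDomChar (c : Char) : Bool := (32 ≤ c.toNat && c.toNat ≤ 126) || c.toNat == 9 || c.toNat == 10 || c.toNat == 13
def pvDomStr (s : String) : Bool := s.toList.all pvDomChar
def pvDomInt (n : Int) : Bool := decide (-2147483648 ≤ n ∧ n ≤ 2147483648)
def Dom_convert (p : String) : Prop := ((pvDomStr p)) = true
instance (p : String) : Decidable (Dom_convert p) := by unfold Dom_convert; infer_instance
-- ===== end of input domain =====

-- B replaces A's recursion with deques and per-level re-splitting by a single iterative loop that
-- finds each split point with a running balance counter and assembles the answer from prefix/suffix
-- piece lists joined at the end (alternative decomposition; fuel in both ports is only a totality guard).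

-- ===== PORT A =====

-- valid(p): deque 'left' of '(' chars; appendleft = cons, pop (right end) = dropLast
def goValidA (left : List Char) : List Char → Bool
  | [] => true
  | c :: rest =>
      if c = '(' then goValidA ('(' :: left) rest
      else if c = ')' then
        match left with
        | [] => false
        | _ :: _ => goValidA left.dropLast rest
      else goValidA left rest

def validA (p : List Char) : Bool := goValidA [] p

-- the for-loop of convert with break: returns i+1 (= chars consumed) at the first point
-- where len(left) == len(right); none if the loop runs out
def splitA (left right : List Char) : List Char → Option Nat
  | [] => none
  | c :: rest =>
      let lr := if c = '(' then (c :: left, right) else (left, c :: right)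
      if lr.1.length = lr.2.length then some (lr.1.length + lr.2.length)
      else splitA lr.1 lr.2 rest

-- fuel ≥ length + 1 only guarantees termination of the Python recursion; it never changes the value
def convertA : Nat → List Char → List Char
  | 0, _ => []
  | _ + 1, [] => []
  | fuel + 1, c :: rest =>
      match splitA [] [] (c :: rest) with
      | none =>
          -- the break never fires: u = '' and v = '' keep their initial values
          [] ++ convertA fuel []
      | some k =>
          let u := PySem.List.slice (c :: rest) (some 0) (some (k : Int))      -- p[0:i+1]
          let v := PySem.List.slice (c :: rest) (some (k : Int)) none          -- p[i+1:]
          if validA u then u ++ convertA fuel v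
          else
            -- str = '(' + convert(v) + ')'; then append the flipped chars of u[1:len(u)-1]
            (PySem.List.slice u (some 1) (some ((u.length : Int) - 1))).foldl
              (fun acc ch => acc ++ [if ch = '(' then ')' else '(']) (['('] ++ convertA fuel v ++ [')'])

def convert (p : String) : String := String.ofList (convertA (p.toList.length + 1) p.toList)

-- ===== PORT B =====

-- is_correct: running counter, a ')' at counter zero fails
def okB (bal : Int) : List Char → Bool
  | [] => true
  | c :: rest =>
      if c = '(' then okB (bal + 1) rest
      else if c = ')' then
        if bal = 0 then false else okB (bal - 1) rest
      else okB bal rest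

-- single-pass running-balance search for the first balanced split point
def findB (bal : Int) (i : Nat) : List Char → Option Nat
  | [] => none
  | c :: rest =>
      let b := bal + (if c = '(' then 1 else -1)
      if b = 0 then some (i + 1) else findB b (i + 1) rest

-- the flipped middle part u[1:idx-1]
def flipMidB (u : List Char) (idx : Nat) : List Char :=
  (PySem.List.slice u (some 1) (some ((idx : Int) - 1))).map (fun c => if c = '(' then ')' else '(')

-- the while-loop: pre collects prefix pieces, post stacks suffix pieces (joined reversed);
-- fuel is only a totality guard (each round strictly shrinks s)
def loopB : Nat → List (List Char) → List (List Char) → List Char → List Char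
  | 0, pre, post, _ => pre.flatten ++ post.reverse.flatten
  | _ + 1, pre, post, [] => pre.flatten ++ post.reverse.flatten
  | fuel + 1, pre, post, c :: rest =>
      match findB 0 0 (c :: rest) with
      | none => pre.flatten ++ post.reverse.flatten
      | some k =>
          let u := PySem.List.slice (c :: rest) none (some (k : Int))          -- s[:idx]
          let v := PySem.List.slice (c :: rest) (some (k : Int)) none          -- s[idx:]
          if okB 0 u then loopB fuel (pre ++ [u]) post v
          else loopB fuel (pre ++ [['(']]) (post ++ [')' :: flipMidB u k]) v

def convert_alt (p : String) : String := String.ofList (loopB (p.toList.length + 1) [] [] p.toList)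

-- ===== PRECONDITION & SPEC =====
def Spec_convert (p : String) (out : String) : Prop := out = convert_alt p
instance (p : String) (out : String) : Decidable (Spec_convert p out) := by unfold Spec_convert; infer_instance

-- ===== CLAIM (what is proved, stated in full; the proofs are below) =====
def Claim_equal_convert : Prop := ∀ (p : String), Dom_convert p → Spec_convert p (convert p)

-- ===== LEMMAS AND PROOFS =====

theorem findB_bounds : ∀ (rest : List Char) (bal : Int) (i k : Nat),
    findB bal i rest = some k → i < k ∧ k ≤ i + rest.length := by
  intro rest
  induction rest with
  | nil => intro bal i k h; simp [findB] at h
  | cons c rest ih =>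
      intro bal i k h
      simp only [findB] at h
      by_cases hb : bal + (if c = '(' then 1 else -1) = 0
      · rw [if_pos hb] at h
        have := Option.some.inj h
        simp; omega
      · rw [if_neg hb] at h
        have := ih _ _ _ h; simp at this ⊢; omega

theorem split_eq_find : ∀ (rest left right : List Char),
    splitA left right rest =
      findB ((left.length : Int) - (right.length : Int)) (left.length + right.length) rest := by
  intro rest
  induction rest with
  | nil => intro l r; simp [splitA, findB]
  | cons c rest ih =>
      intro l r
      simp only [splitA, findB]
      by_cases hc : c = '('
      · simp only [if_pos hc]
        by_cases he : l.length + 1 = r.length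
        · rw [if_pos (by simp; omega), if_pos (by omega)]
          simp; omega
        · rw [if_neg (by simp; omega), if_neg (by omega)]
          rw [ih (c :: l) r]
          congr 1 <;> (simp; omega)
      · simp only [if_neg hc]
        by_cases he : l.length = r.length + 1
        · rw [if_pos (by simp; omega), if_pos (by omega)]
          simp; omega
        · rw [if_neg (by simp; omega), if_neg (by omega)]
          rw [ih l (c :: r)]
          congr 1 <;> (simp; omega)

theorem valid_eq_ok : ∀ (rest left : List Char),
    goValidA left rest = okB (left.length : Int) rest := by
  intro rest
  induction rest with
  | nil => intro l; simp [goValidA, okB]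
  | cons c rest ih =>
      intro l
      simp only [goValidA, okB]
      by_cases hc : c = '('
      · simp only [if_pos hc]
        have := ih ('(' :: l)
        simpa [add_comm] using this
      · simp only [if_neg hc]
        by_cases hc2 : c = ')'
        · simp only [if_pos hc2]
          cases l with
          | nil => simp
          | cons a as =>
              rw [if_neg (by simp only [List.length_cons]; push_cast; omega)]
              rw [ih (a :: as).dropLast]
              simp
        · simp only [if_neg hc2]
          exact ih l

theorem convertA_nil : ∀ (fuel : Nat), convertA fuel [] = [] := by
  intro fuel; cases fuel <;> simp [convertA]

theorem map_singleton_flatten {α β : Type} (f : α → β) :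
    ∀ (l : List α), (l.map (fun x => [f x])).flatten = l.map f := by
  intro l; induction l <;> simp_all

theorem loopB_eq : ∀ (n : Nat) (s : List Char), s.length ≤ n →
    ∀ (fa fb : Nat), s.length < fa → s.length < fb →
    ∀ (pre post : List (List Char)),
    loopB fb pre post s = pre.flatten ++ (convertA fa s ++ post.reverse.flatten) := by
  intro n
  induction n with
  | zero =>
      intro s hs fa fb hfa hfb pre post
      have hsnil : s = [] := by cases s <;> simp_all
      subst hsnil
      obtain ⟨fa', rfl⟩ : ∃ m, fa = m + 1 := ⟨fa - 1, by omega⟩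
      obtain ⟨fb', rfl⟩ : ∃ m, fb = m + 1 := ⟨fb - 1, by omega⟩
      simp [loopB, convertA]
  | succ n ih =>
      intro s hs fa fb hfa hfb pre post
      cases s with
      | nil =>
          obtain ⟨fa', rfl⟩ : ∃ m, fa = m + 1 := ⟨fa - 1, by omega⟩
          obtain ⟨fb', rfl⟩ : ∃ m, fb = m + 1 := ⟨fb - 1, by omega⟩
          simp [loopB, convertA]
      | cons c rest =>
          obtain ⟨fa', rfl⟩ : ∃ m, fa = m + 1 := ⟨fa - 1, by omega⟩
          obtain ⟨fb', rfl⟩ : ∃ m, fb = m + 1 := ⟨fb - 1, by omega⟩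
          simp only [loopB, convertA]
          rw [split_eq_find]
          norm_num
          cases h : findB 0 0 (c :: rest) with
          | none => simp [convertA_nil]
          | some k =>
              have hk := findB_bounds (c :: rest) 0 0 k h
              have hk1 : 1 ≤ k := by omega
              have hk2 : k ≤ rest.length + 1 := by simpa using hk.2
              simp only
              have hm : min ((k : Int)) ((rest.length : Int) + 1) = (k : Int) := by omega
              rw [hm]
              have hs' : rest.length + 1 ≤ n + 1 := by simpa using hs
              have hfa' : rest.length + 1 < fa' + 1 := by simpa using hfa
              have hfb' : rest.length + 1 < fb' + 1 := by simpa using hfb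
              have hvn : ((c :: rest).drop k).length ≤ n := by simp; omega
              have hva : ((c :: rest).drop k).length < fa' := by simp; omega
              have hvb : ((c :: rest).drop k).length < fb' := by simp; omega
              have hval : validA ((c :: rest).take k) = okB 0 ((c :: rest).take k) := by
                simpa using valid_eq_ok ((c :: rest).take k) []
              rw [← hval]
              by_cases hvld : validA ((c :: rest).take k) = true
              · rw [if_pos hvld, if_pos hvld, ih _ hvn _ _ hva hvb]
                simp
              · rw [if_neg hvld, if_neg hvld, ih _ hvn _ _ hva hvb]
                simp [flipMidB]
                exact (map_singleton_flatten _ _).symm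

-- ===== VERDICT (by name: the statement is the Claim_ definition above) =====
theorem convert_spec : Claim_equal_convert := by
  intro p _
  unfold Spec_convert convert convert_alt
  rw [loopB_eq p.toList.length p.toList le_rfl (p.toList.length + 1) (p.toList.length + 1)
    (by omega) (by omega)]
  simp
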